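-- pv_equiv track=rewrite | github.com/mofa-org/studio | node-hub/dora-text-segmenter/dora_text_segmenter/multi_participant_segmenter.py | select_oldest_session_queue
-- ===== SOURCE A (Python) =====
-- def select_oldest_session_queue(participant_names, session_timestamps, segment_queues):
--     """
--     Find participant queue with oldest session timestamp.
--     Only considers queues that have both session timestamp AND segments.
--     """
--     candidates = []
--
--     for participant in participant_names:
--         if session_timestamps[participant] and segment_queues[participant]:
--             oldest_ts = session_timestamps[participant][0]["timestamp"]
--             candidates.append((participant, oldest_ts))
--
--     if not candidates:
--         return None
--
--     # Sort by timestamp, return oldest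
--     candidates.sort(key=lambda x: x[1])
--     return candidates[0][0]
-- ===== SOURCE B (Python) =====
-- def select_oldest_session_queue(participant_names, session_timestamps, segment_queues):
--     """
--     Find participant queue with oldest session timestamp.
--     Only considers queues that have both session timestamp AND segments.
--     Staged: filter eligible participants, compute the minimum timestamp,
--     then return the first participant achieving it (= A's stable-sort winner).
--     """
--     eligible = [p for p in participant_names
--                 if session_timestamps[p] and segment_queues[p]]
--     if not eligible:
--         return None
--     oldest = min(session_timestamps[p][0]["timestamp"] for p in eligible)
--     for p in eligible:
--         if session_timestamps[p][0]["timestamp"] == oldest: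
--             return p
-- ===== Notes on version B (the rewrite author's own statement) =====
-- stated objective: simpler
-- what changed: Replaces collect-candidates-then-stable-sort with three staged linear passes: filter the eligible participants, take min() of their first-session timestamps, and return the first participant achieving that minimum (same winner as the stable sort's head).
import Mathlib
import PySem

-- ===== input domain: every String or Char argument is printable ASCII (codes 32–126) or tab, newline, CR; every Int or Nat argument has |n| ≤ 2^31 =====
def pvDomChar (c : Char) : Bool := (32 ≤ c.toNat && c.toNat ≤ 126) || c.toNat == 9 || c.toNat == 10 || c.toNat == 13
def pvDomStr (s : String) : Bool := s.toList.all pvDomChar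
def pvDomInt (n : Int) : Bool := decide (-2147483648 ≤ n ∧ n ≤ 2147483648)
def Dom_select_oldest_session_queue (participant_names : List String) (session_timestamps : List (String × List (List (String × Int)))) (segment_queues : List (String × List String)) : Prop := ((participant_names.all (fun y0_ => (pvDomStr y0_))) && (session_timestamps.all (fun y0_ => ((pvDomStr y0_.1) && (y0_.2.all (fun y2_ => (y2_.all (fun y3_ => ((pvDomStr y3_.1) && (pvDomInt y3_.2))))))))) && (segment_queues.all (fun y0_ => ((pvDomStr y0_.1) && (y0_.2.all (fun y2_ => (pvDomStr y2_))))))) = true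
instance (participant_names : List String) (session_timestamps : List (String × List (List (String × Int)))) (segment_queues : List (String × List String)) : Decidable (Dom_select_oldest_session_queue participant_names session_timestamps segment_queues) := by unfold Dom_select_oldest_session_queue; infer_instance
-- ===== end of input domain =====

-- B replaces A's collect-then-stable-sort with three staged passes (filter eligibles, min of timestamps, first achiever); objective: simpler.

-- shared dict-lookup helper: first match in the association list (Python dict lookup)
def pvGet {α : Type} (l : List (String × α)) (k : String) : Option α :=
  (l.find? (fun kv => kv.1 == k)).map (·.2)

-- ===== PORT A =====
def select_oldest_session_queue (participant_names : List String) (session_timestamps : List (String × List (List (String × Int)))) (segment_queues : List (String × List String)) : Option String :=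
  -- candidates loop; Pre_ guarantees every pvGet here is 'some', so getD never supplies its default
  let candidates := participant_names.foldl (fun acc p =>
    let st := (pvGet session_timestamps p).getD []
    let q  := (pvGet segment_queues p).getD []
    if !st.isEmpty && !q.isEmpty then
      acc ++ [(p, (pvGet (st.headD []) "timestamp").getD 0)]
    else acc) ([] : List (String × Int))
  if candidates.isEmpty then none
  else some (((PySem.List.sorted candidates (fun x => x.2) false).headD ("", 0)).1)

-- ===== PORT B =====
-- session_timestamps[p][0]["timestamp"]; Pre_ guarantees every lookup succeeds
def pvTs (session_timestamps : List (String × List (List (String × Int)))) (p : String) : Int :=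
  (pvGet (((pvGet session_timestamps p).getD []).headD []) "timestamp").getD 0

def select_oldest_session_queue_alt (participant_names : List String) (session_timestamps : List (String × List (List (String × Int)))) (segment_queues : List (String × List String)) : Option String :=
  let eligible := participant_names.filter (fun p =>
    !((pvGet session_timestamps p).getD []).isEmpty && !((pvGet segment_queues p).getD []).isEmpty)
  if eligible.isEmpty then none
  else
    match PySem.List.min? (eligible.map (pvTs session_timestamps)) (fun y => y) with
    | none => none   -- unreachable: eligible is nonempty
    | some oldest => eligible.find? (fun p => pvTs session_timestamps p == oldest)

-- ===== PRECONDITION & SPEC =====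
-- Pre_ excludes exactly the inputs where the Python raises KeyError: a participant name missing
-- from session_timestamps or segment_queues, or an eligible participant whose first session dict
-- has no "timestamp" key.
def pvPreOk (session_timestamps : List (String × List (List (String × Int)))) (segment_queues : List (String × List String)) (p : String) : Bool :=
  match pvGet session_timestamps p with
  | none => false            -- KeyError on session_timestamps[p]
  | some st =>
    if st.isEmpty then true  -- 'and' short-circuits: segment_queues[p] is never evaluated
    else match pvGet segment_queues p with
      | none => false        -- KeyError on segment_queues[p]
      | some q => q.isEmpty || (pvGet (st.headD []) "timestamp").isSome

def Pre_select_oldest_session_queue (participant_names : List String) (session_timestamps : List (String × List (List (String × Int)))) (segment_queues : List (String × List String)) : Prop :=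
  participant_names.all (pvPreOk session_timestamps segment_queues) = true
instance (participant_names : List String) (session_timestamps : List (String × List (List (String × Int)))) (segment_queues : List (String × List String)) : Decidable (Pre_select_oldest_session_queue participant_names session_timestamps segment_queues) := by unfold Pre_select_oldest_session_queue; infer_instance

def pvWitness_select_oldest_session_queue : List String × (List (String × List (List (String × Int)))) × (List (String × List String)) :=
  (["a", "b"], [("a", [[("timestamp", 3)]]), ("b", [[("timestamp", 1)]])], [("a", ["s"]), ("b", ["t"])])

def Spec_select_oldest_session_queue (participant_names : List String) (session_timestamps : List (String × List (List (String × Int)))) (segment_queues : List (String × List String)) (out : Option String) : Prop := out = select_oldest_session_queue_alt participant_names session_timestamps segment_queues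
instance (participant_names : List String) (session_timestamps : List (String × List (List (String × Int)))) (segment_queues : List (String × List String)) (out : Option String) : Decidable (Spec_select_oldest_session_queue participant_names session_timestamps segment_queues out) := by unfold Spec_select_oldest_session_queue; infer_instance

-- ===== CLAIM (what is proved, stated in full; the proofs are below) =====
def Claim_equal_select_oldest_session_queue : Prop := ∀ (participant_names : List String) (session_timestamps : List (String × List (List (String × Int)))) (segment_queues : List (String × List String)), Dom_select_oldest_session_queue participant_names session_timestamps segment_queues → Pre_select_oldest_session_queue participant_names session_timestamps segment_queues → Spec_select_oldest_session_queue participant_names session_timestamps segment_queues (select_oldest_session_queue participant_names session_timestamps segment_queues)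

-- ===== LEMMAS AND PROOFS =====

-- A's eligibility guard, and the (participant, oldest_ts) entry it appends
def pvGuard (session_timestamps : List (String × List (List (String × Int)))) (segment_queues : List (String × List String)) (p : String) : Bool :=
  !((pvGet session_timestamps p).getD []).isEmpty && !((pvGet segment_queues p).getD []).isEmpty

def pvEntry (session_timestamps : List (String × List (List (String × Int)))) (p : String) : String × Int :=
  (p, pvTs session_timestamps p)

-- running minimum step (tie keeps the earlier element): what A's sorted-head computes
def pvStep (best : Option (String × Int)) (x : String × Int) : Option (String × Int) :=
  match best with
  | none => some x
  | some b => if x.2 < b.2 then some x else some b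

lemma A_fold_eq (sts : List (String × List (List (String × Int)))) (sq : List (String × List String)) :
    ∀ (pn : List String) (acc : List (String × Int)),
      pn.foldl (fun acc p =>
        let st := (pvGet sts p).getD []
        let q  := (pvGet sq p).getD []
        if !st.isEmpty && !q.isEmpty then
          acc ++ [(p, (pvGet (st.headD []) "timestamp").getD 0)]
        else acc) acc = acc ++ (pn.filter (pvGuard sts sq)).map (pvEntry sts) := by
  intro pn
  induction pn with
  | nil => intro acc; simp
  | cons p t ih =>
    intro acc
    simp only [List.foldl_cons, List.filter_cons]
    by_cases h : pvGuard sts sq p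
    · simp only [h, if_pos, List.map_cons]
      rw [show (!((pvGet sts p).getD []).isEmpty && !((pvGet sq p).getD []).isEmpty) = true from h]
      simp only [if_pos]
      rw [ih, List.append_assoc]; rfl
    · simp only [h, if_neg, Bool.false_eq_true, not_false_iff]
      rw [show (!((pvGet sts p).getD []).isEmpty && !((pvGet sq p).getD []).isEmpty) = false from by
        simpa [pvGuard] using h]
      simp only [Bool.false_eq_true, if_false]
      rw [ih]

lemma head?_insertBy (x : String × Int) (s : List (String × Int)) :
    (PySem.List.insertBy (fun a b => decide (a.2 < b.2)) x s).head? = pvStep s.head? x := by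
  cases s with
  | nil => rfl
  | cons h t =>
    show (if (decide (x.2 < h.2) : Bool) then x :: h :: t else h :: PySem.List.insertBy _ x t).head? = _
    by_cases hx : x.2 < h.2 <;> simp [hx, pvStep]

lemma sorted_head_eq_fold (c : List (String × Int)) :
    c.foldl pvStep none = (PySem.List.sorted c (fun x => x.2) false).head? := by
  induction c using List.reverseRecOn with
  | nil => rfl
  | append_singleton c x ih =>
    rw [List.foldl_append, List.foldl_cons, List.foldl_nil, ih]
    rw [show PySem.List.sorted (c ++ [x]) (fun x => x.2) false
          = PySem.List.insertBy (fun a b => decide (a.2 < b.2)) x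
              (PySem.List.sorted c (fun x => x.2) false) from by
      rw [PySem.List.sorted_eq_foldl_insertBy, PySem.List.sorted_eq_foldl_insertBy,
          List.foldl_append, List.foldl_cons, List.foldl_nil]]
    rw [head?_insertBy]

lemma foldl_min_le (l : List Int) : ∀ a : Int, l.foldl min a ≤ a := by
  induction l with
  | nil => intro a; simp
  | cons b t ih =>
    intro a
    calc (b :: t).foldl min a = t.foldl min (min a b) := by simp
    _ ≤ min a b := ih _
    _ ≤ a := min_le_left _ _

-- the running minimum over x :: t is the first element of x :: t whose snd equals min of snds
lemma fold_eq_find (t : List (String × Int)) : ∀ (x : String × Int),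
    t.foldl pvStep (some x) =
      (x :: t).find? (fun y => y.2 == (t.map (fun y => y.2)).foldl min x.2) := by
  induction t with
  | nil => intro x; simp [List.find?]
  | cons y t ih =>
    intro x
    have hM : ((y :: t).map (fun y => y.2)).foldl min x.2
        = (t.map (fun y => y.2)).foldl min (min x.2 y.2) := by simp
    have hle := foldl_min_le (t.map (fun y => y.2)) (min x.2 y.2)
    by_cases hxy : y.2 < x.2
    · -- y replaces x; x cannot achieve the min (min < x.2)
      have hstep : pvStep (some x) y = some y := by simp [pvStep, hxy]
      have hz : min x.2 y.2 = y.2 := by omega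
      rw [hz] at hle
      have hxfalse : ¬ ((fun w : String × Int => w.2 == (t.map (fun y => y.2)).foldl min y.2) x = true) := by
        simp only [beq_iff_eq]; intro h; omega
      rw [List.foldl_cons, hstep, ih y, hM, hz]
      rw [List.find?_cons_of_neg (p := fun w : String × Int => w.2 == (t.map (fun y => y.2)).foldl min y.2) hxfalse]
    · -- x stays; if x doesn't achieve the min then neither does y
      have hstep : pvStep (some x) y = some x := by simp [pvStep, hxy]
      have hz : min x.2 y.2 = x.2 := by omega
      rw [hz] at hle
      rw [List.foldl_cons, hstep, ih x, hM, hz]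
      by_cases hx : ((fun w : String × Int => w.2 == (t.map (fun y => y.2)).foldl min x.2) x = true)
      · rw [List.find?_cons_of_pos (p := fun w : String × Int => w.2 == (t.map (fun y => y.2)).foldl min x.2) hx,
            List.find?_cons_of_pos (p := fun w : String × Int => w.2 == (t.map (fun y => y.2)).foldl min x.2) hx]
      · have hyf : ¬ ((fun w : String × Int => w.2 == (t.map (fun y => y.2)).foldl min x.2) y = true) := by
          simp only [beq_iff_eq] at hx ⊢
          intro h; apply hx; omega
        rw [List.find?_cons_of_neg (p := fun w : String × Int => w.2 == (t.map (fun y => y.2)).foldl min x.2) hx,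
            List.find?_cons_of_neg (p := fun w : String × Int => w.2 == (t.map (fun y => y.2)).foldl min x.2) hx,
            List.find?_cons_of_neg (p := fun w : String × Int => w.2 == (t.map (fun y => y.2)).foldl min x.2) hyf]

-- ===== VERDICT (by name: the statement is the Claim_ definition above) =====
theorem select_oldest_session_queue_spec : Claim_equal_select_oldest_session_queue := by
  intro pn sts sq _ _
  unfold Spec_select_oldest_session_queue select_oldest_session_queue select_oldest_session_queue_alt
  simp only
  rw [A_fold_eq, List.nil_append]
  have hguard : (fun p => !((pvGet sts p).getD []).isEmpty && !((pvGet sq p).getD []).isEmpty)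
      = pvGuard sts sq := rfl
  rw [hguard]
  cases he : pn.filter (pvGuard sts sq) with
  | nil => simp
  | cons p0 ps =>
    simp only [List.map_cons, List.isEmpty_cons, Bool.false_eq_true, if_false]
    -- B's min
    rw [PySem.List.min?_id_cons]
    -- A's sorted head via the running minimum
    have hA := sorted_head_eq_fold ((p0 :: ps).map (pvEntry sts))
    rw [List.map_cons, List.foldl_cons] at hA
    have hstep0 : pvStep none (pvEntry sts p0) = some (pvEntry sts p0) := rfl
    rw [hstep0, fold_eq_find] at hA
    -- identify the two minima
    have hmap : (ps.map (pvEntry sts)).map (fun y => y.2) = ps.map (pvTs sts) := by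
      simp [pvEntry, Function.comp]
    rw [hmap] at hA
    have hfind : ((pvEntry sts p0 :: ps.map (pvEntry sts)).find?
          (fun y => y.2 == (ps.map (pvTs sts)).foldl min (pvEntry sts p0).2))
        = ((p0 :: ps).find? (fun p => pvTs sts p == (ps.map (pvTs sts)).foldl min (pvTs sts p0))).map (pvEntry sts) := by
      rw [show (pvEntry sts p0 :: ps.map (pvEntry sts)) = (p0 :: ps).map (pvEntry sts) from rfl]
      rw [List.find?_map]; rfl
    rw [hfind] at hA
    -- conclude: A's sorted head is exactly the found entry
    cases hf : (p0 :: ps).find? (fun p => pvTs sts p == (ps.map (pvTs sts)).foldl min (pvTs sts p0)) with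
    | none =>
      rw [hf, Option.map_none] at hA
      have hnil : PySem.List.sorted (pvEntry sts p0 :: ps.map (pvEntry sts)) (fun x => x.2) false = [] :=
        List.head?_eq_none_iff.mp hA.symm
      have : pvEntry sts p0 :: ps.map (pvEntry sts) = [] := (PySem.List.sorted_eq_nil_iff _ _ _).mp hnil
      simp at this
    | some q =>
      rw [hf, Option.map_some] at hA
      have hhead : (PySem.List.sorted (pvEntry sts p0 :: ps.map (pvEntry sts)) (fun x => x.2) false).headD ("", 0) = pvEntry sts q := by
        cases hs : PySem.List.sorted (pvEntry sts p0 :: ps.map (pvEntry sts)) (fun x => x.2) false with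
        | nil => rw [hs] at hA; simp at hA
        | cons a l =>
          rw [hs] at hA
          simp only [List.head?_cons, Option.some.injEq] at hA
          simp [hA]
      rw [hhead]
      show some (pvEntry sts q).1
          = (p0 :: ps).find? (fun p => pvTs sts p == (ps.map (pvTs sts)).foldl min (pvTs sts p0))
      rw [hf]
      rfl
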